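-- pv_equiv track=rewrite | github.com/chrishokamp/dynamic-transformer-ensembles | research/coverage_and_density_analysis/analyse_dataset.py | extract_fragments
-- ===== SOURCE A (Python) =====
-- def extract_fragments(a_tokens, s_tokens):
--     a_size = len(a_tokens)
--     s_size = len(s_tokens)
--     F = []
--     i, j = 0, 0
--     # i: for each summary token
--     while i < s_size:
--         f = []
--         # j: for each article token
--         while j < a_size:
--             # if a&s tokens match:
--
--             if s_tokens[i] == a_tokens[j]:
--                 i_, j_ = i, j
--                 # look further until tokens don't match
--                 while s_tokens[i_] == a_tokens[j_]:
--                     i_ += 1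
--                     j_ += 1
--                     if i_ >= s_size or j_ >= a_size:
--                         break
--                 # if new span is larger than previous fragment
--                 if len(f) < (i_ - i ): # maybe instead: i_ - i - 1
--                     f = s_tokens[i: i_] # maybe i_ - 1
--                 j = j_
--             else:
--                 j += 1
--         i += max(len(f), 1)
--         j = 0
--         if len(f) > 1:
--             F.append(f)
--     return F
-- ===== SOURCE B (Python) =====
-- def extract_fragments(a_tokens, s_tokens):
--     a_size = len(a_tokens)
--     s_size = len(s_tokens)
--     # memoized longest-common-prefix oracle: cache[(i, j)] = length of the
--     # longest common prefix of s_tokens[i:] and a_tokens[j:] (computed on demand)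
--     cache = {}
--
--     def lcp_at(i, j):
--         path = []
--         while (i, j) not in cache and i < s_size and j < a_size \
--                 and s_tokens[i] == a_tokens[j]:
--             path.append((i, j))
--             i += 1
--             j += 1
--         v = cache.get((i, j), 0)
--         for key in reversed(path):
--             v += 1
--             cache[key] = v
--         return v
--
--     F = []
--     i = 0
--     while i < s_size:
--         best = 0
--         j = 0
--         while j < a_size:
--             if s_tokens[i] != a_tokens[j]:
--                 j += 1
--                 continue
--             m = lcp_at(i, j)
--             if best < m:
--                 best = m
--             j += m
--         if best > 1:
--             F.append(s_tokens[i:i + best])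
--         i += max(best, 1)
--     return F
-- ===== Notes on version B (the rewrite author's own statement) =====
-- stated objective: alternative
-- what changed: B consults a memoized longest-common-prefix oracle (each (i,j) diagonal cell computed at most once, unwound into a dict cache) and keeps only an integer best length, instead of A's token-by-token re-scanning of every matching span and list re-slicing inside the scan.
import Mathlib
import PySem

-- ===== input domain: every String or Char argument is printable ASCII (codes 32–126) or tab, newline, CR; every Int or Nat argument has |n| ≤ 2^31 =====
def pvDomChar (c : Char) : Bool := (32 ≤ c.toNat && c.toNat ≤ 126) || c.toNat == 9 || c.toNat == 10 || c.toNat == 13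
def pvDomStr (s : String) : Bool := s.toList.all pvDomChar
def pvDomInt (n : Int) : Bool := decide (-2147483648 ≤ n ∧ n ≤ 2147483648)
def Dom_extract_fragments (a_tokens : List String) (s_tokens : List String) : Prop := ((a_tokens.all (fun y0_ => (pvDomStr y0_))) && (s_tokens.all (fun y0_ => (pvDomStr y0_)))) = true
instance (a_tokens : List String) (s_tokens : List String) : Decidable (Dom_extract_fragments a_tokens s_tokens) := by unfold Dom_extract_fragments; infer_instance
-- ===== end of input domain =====

-- B replaces A's repeated token-by-token re-scanning of matching spans (and its list
-- re-slicing inside the scan) by a memoized longest-common-prefix oracle consulted by a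
-- greedy scan that keeps only an integer best length; equivalence of the return values is
-- proved below. (The fuel counters below only make the while-loops total; each port is
-- always called with enough fuel, so they never change the computed value.)

-- ===== PORT A =====
-- innermost while loop: 'while s[i_]==a[j_]: i_+=1; j_+=1; if out of bounds: break'
-- (the bounds guard is checked first here, which is equivalent because Python only
-- re-tests the condition while both indices are in range; fuel s.length is enough
-- because i_ grows each step and the loop stops at i_ = s.length)
def pvExtendA (s a : List String) : Nat → Nat → Nat → Nat × Nat
  | 0, i_, j_ => (i_, j_)
  | fuel + 1, i_, j_ =>
    if i_ < s.length ∧ j_ < a.length then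
      if s.getD i_ "" = a.getD j_ "" then pvExtendA s a fuel (i_ + 1) (j_ + 1) else (i_, j_)
    else (i_, j_)

-- inner while loop over j (fuel a.length + 1 is enough: j grows every iteration)
def pvInnerA (s a : List String) : Nat → Nat → Nat → List String → List String
  | 0, _, _, f => f
  | fuel + 1, i, j, f =>
    if j < a.length then
      if s.getD i "" = a.getD j "" then
        let p := pvExtendA s a s.length i j
        pvInnerA s a fuel i p.2 (if f.length < p.1 - i then (s.drop i).take (p.1 - i) else f)
      else pvInnerA s a fuel i (j + 1) f
    else f

-- outer while loop over i (fuel s.length + 1 is enough: i grows every iteration)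
def pvOuterA (s a : List String) : Nat → Nat → List (List String) → List (List String)
  | 0, _, F => F
  | fuel + 1, i, F =>
    if i < s.length then
      let f := pvInnerA s a (a.length + 1) i 0 []
      pvOuterA s a fuel (i + max f.length 1) (if f.length > 1 then F ++ [f] else F)
    else F

def extract_fragments (a_tokens : List String) (s_tokens : List String) : List (List String) :=
  pvOuterA s_tokens a_tokens (s_tokens.length + 1) 0 []

-- ===== PORT B =====
-- walk phase of lcp_at: follow the equal diagonal until a cached cell, a bound or a
-- mismatch (fuel s.length is enough: i grows each step and the walk stops at i = s.length)
def pvWalk (s a : List String) (c : PySem.Dict (Nat × Nat) Nat) :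
    Nat → Nat → Nat → List (Nat × Nat) × Nat × Nat
  | 0, i, j => ([], i, j)
  | fuel + 1, i, j =>
    if (c.get? (i, j)).isNone ∧ i < s.length ∧ j < a.length ∧ s.getD i "" = a.getD j "" then
      let r := pvWalk s a c fuel (i + 1) (j + 1)
      ((i, j) :: r.1, r.2)
    else ([], i, j)

-- lcp_at: walk, read the stopping cell (cache.get(key, 0)), unwind the path writing v+1, v+2, …
def pvLcpAt (s a : List String) (c : PySem.Dict (Nat × Nat) Nat) (i j : Nat) :
    Nat × PySem.Dict (Nat × Nat) Nat :=
  let w := pvWalk s a c (s.length + 1) i j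
  w.1.reverse.foldl (fun p key => (p.1 + 1, p.2.insert key (p.1 + 1))) (c.getD w.2 0, c)

-- inner while loop over j: mismatches step by one, matches look the length up and jump
def pvInnerB (s a : List String) :
    Nat → PySem.Dict (Nat × Nat) Nat → Nat → Nat → Nat → Nat × PySem.Dict (Nat × Nat) Nat
  | 0, c, _, _, best => (best, c)
  | fuel + 1, c, i, j, best =>
    if j < a.length then
      if s.getD i "" ≠ a.getD j "" then
        pvInnerB s a fuel c i (j + 1) best
      else
        let r := pvLcpAt s a c i j
        pvInnerB s a fuel r.2 i (j + r.1) (if best < r.1 then r.1 else best)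
    else (best, c)

-- outer while loop over i (the cache persists across iterations, as in B's Python)
def pvOuterB (s a : List String) :
    Nat → PySem.Dict (Nat × Nat) Nat → Nat → List (List String) → List (List String)
  | 0, _, _, F => F
  | fuel + 1, c, i, F =>
    if i < s.length then
      let r := pvInnerB s a (a.length + 1) c i 0 0
      pvOuterB s a fuel r.2 (i + max r.1 1) (if r.1 > 1 then F ++ [(s.drop i).take r.1] else F)
    else F

def extract_fragments_alt (a_tokens : List String) (s_tokens : List String) : List (List String) :=
  pvOuterB s_tokens a_tokens (s_tokens.length + 1) PySem.Dict.empty 0 []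

-- ===== PRECONDITION & SPEC =====
def Spec_extract_fragments (a_tokens : List String) (s_tokens : List String) (out : List (List String)) : Prop := out = extract_fragments_alt a_tokens s_tokens
instance (a_tokens : List String) (s_tokens : List String) (out : List (List String)) : Decidable (Spec_extract_fragments a_tokens s_tokens out) := by unfold Spec_extract_fragments; infer_instance

-- ===== CLAIM (what is proved, stated in full; the proofs are below) =====
def Claim_equal_extract_fragments : Prop := ∀ (a_tokens : List String) (s_tokens : List String), Dom_extract_fragments a_tokens s_tokens → Spec_extract_fragments a_tokens s_tokens (extract_fragments a_tokens s_tokens)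

-- ===== LEMMAS AND PROOFS =====

-- longest common prefix of two token lists: the value both programs compute for a match
def pvLcp : List String → List String → Nat
  | x :: xs, y :: ys => if x = y then pvLcp xs ys + 1 else 0
  | _, _ => 0

theorem pvLcp_nil_right (xs : List String) : pvLcp xs [] = 0 := by
  cases xs <;> rfl

theorem pvLcp_le_length (xs ys : List String) : pvLcp xs ys ≤ xs.length := by
  fun_induction pvLcp xs ys <;> simp_all

theorem pvLcp_zero (s a : List String) (i j : Nat)
    (h : ¬(i < s.length ∧ j < a.length ∧ s.getD i "" = a.getD j "")) :
    pvLcp (s.drop i) (a.drop j) = 0 := by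
  rcases Nat.lt_or_ge i s.length with h1 | h1
  · rcases Nat.lt_or_ge j a.length with h2 | h2
    · have h3 : ¬ s.getD i "" = a.getD j "" := fun he => h ⟨h1, h2, he⟩
      rw [List.drop_eq_getElem_cons h1, List.drop_eq_getElem_cons h2]
      rw [List.getD_eq_getElem s "" h1, List.getD_eq_getElem a "" h2] at h3
      simp [pvLcp, h3]
    · rw [List.drop_eq_nil_of_le h2, pvLcp_nil_right]
  · rw [List.drop_eq_nil_of_le h1]; cases a.drop j <;> rfl

theorem pvLcp_succ (s a : List String) (i j : Nat) (h1 : i < s.length) (h2 : j < a.length)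
    (heq : s.getD i "" = a.getD j "") :
    pvLcp (s.drop i) (a.drop j) = pvLcp (s.drop (i + 1)) (a.drop (j + 1)) + 1 := by
  rw [List.drop_eq_getElem_cons h1, List.drop_eq_getElem_cons h2]
  rw [List.getD_eq_getElem s "" h1, List.getD_eq_getElem a "" h2] at heq
  simp [pvLcp, heq]

-- the cache invariant: every stored entry is the true lcp of the corresponding suffixes
def pvCacheOK (s a : List String) (c : PySem.Dict (Nat × Nat) Nat) : Prop :=
  ∀ p v, c.get? p = some v → v = pvLcp (s.drop p.1) (a.drop p.2)

theorem pvCacheOK_empty (s a : List String) : pvCacheOK s a PySem.Dict.empty := by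
  intro p v hpv
  rw [PySem.Dict.get?_empty] at hpv
  cases hpv

-- A's extension loop computes exactly the lcp (given enough fuel)
theorem pvExtendA_eq (s a : List String) (fuel i j : Nat) (hf : s.length ≤ i + fuel) :
    pvExtendA s a fuel i j = (i + pvLcp (s.drop i) (a.drop j), j + pvLcp (s.drop i) (a.drop j)) := by
  induction fuel generalizing i j with
  | zero =>
    rw [pvLcp_zero s a i j (fun hx => by omega)]
    simp [pvExtendA]
  | succ fuel ih =>
    rw [pvExtendA]
    by_cases hb : i < s.length ∧ j < a.length
    · rw [if_pos hb]
      by_cases heq : s.getD i "" = a.getD j ""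
      · rw [if_pos heq, ih (i + 1) (j + 1) (by omega),
          pvLcp_succ s a i j hb.1 hb.2 heq]
        simp; omega
      · rw [if_neg heq, pvLcp_zero s a i j (fun hx => heq hx.2.2)]
        simp
    · rw [if_neg hb, pvLcp_zero s a i j (fun hx => hb ⟨hx.1, hx.2.1⟩)]
      simp

-- reading a stopping cell of the walk: cache hit gives the stored (true) value, otherwise 0 = lcp
theorem pvLcpAt_stop (s a : List String) (c : PySem.Dict (Nat × Nat) Nat) (i j : Nat)
    (hc : pvCacheOK s a c)
    (h : ¬((c.get? (i, j)).isNone ∧ i < s.length ∧ j < a.length ∧ s.getD i "" = a.getD j "")) :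
    c.getD (i, j) 0 = pvLcp (s.drop i) (a.drop j) := by
  cases hget : c.get? (i, j) with
  | some v =>
    rw [PySem.Dict.getD_eq_get?_getD, hget, Option.getD_some]
    exact hc (i, j) v hget
  | none =>
    rw [PySem.Dict.getD_eq_get?_getD, hget, Option.getD_none]
    have hx : ¬(i < s.length ∧ j < a.length ∧ s.getD i "" = a.getD j "") := by
      intro hx; exact h ⟨by rw [hget]; rfl, hx⟩
    exact (pvLcp_zero s a i j hx).symm

-- walk + unwind at any sufficient fuel: returns the true lcp and preserves the invariant
theorem pvWalkFold_spec (s a : List String) (c : PySem.Dict (Nat × Nat) Nat)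
    (fuel i j : Nat) (hf : s.length ≤ i + fuel) (hc : pvCacheOK s a c) :
    ((pvWalk s a c fuel i j).1.reverse.foldl
        (fun p key => (p.1 + 1, p.2.insert key (p.1 + 1)))
        (c.getD (pvWalk s a c fuel i j).2 0, c)).1 = pvLcp (s.drop i) (a.drop j) ∧
      pvCacheOK s a
        ((pvWalk s a c fuel i j).1.reverse.foldl
          (fun p key => (p.1 + 1, p.2.insert key (p.1 + 1)))
          (c.getD (pvWalk s a c fuel i j).2 0, c)).2 := by
  induction fuel generalizing i j with
  | zero =>
    have hcond : ¬((c.get? (i, j)).isNone ∧ i < s.length ∧ j < a.length ∧ s.getD i "" = a.getD j "") := by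
      intro hx; omega
    simp only [pvWalk, List.reverse_nil, List.foldl_nil]
    exact ⟨pvLcpAt_stop s a c i j hc hcond, hc⟩
  | succ fuel ih =>
    by_cases hcond : (c.get? (i, j)).isNone ∧ i < s.length ∧ j < a.length ∧ s.getD i "" = a.getD j ""
    · have hw : pvWalk s a c (fuel + 1) i j =
          ((i, j) :: (pvWalk s a c fuel (i + 1) (j + 1)).1, (pvWalk s a c fuel (i + 1) (j + 1)).2) := by
        rw [pvWalk, if_pos hcond]
      obtain ⟨hv, hok⟩ := ih (i + 1) (j + 1) (by omega)
      rw [hw]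
      simp only [List.reverse_cons, List.foldl_append, List.foldl_cons, List.foldl_nil]
      constructor
      · rw [hv, pvLcp_succ s a i j hcond.2.1 hcond.2.2.1 hcond.2.2.2]
      · intro p v hpv
        rw [PySem.Dict.get?_insert] at hpv
        split at hpv
        · rename_i hp
          subst hp
          have hv2 := Option.some.inj hpv
          rw [← hv2, hv, pvLcp_succ s a i j hcond.2.1 hcond.2.2.1 hcond.2.2.2]
        · exact hok p v hpv
    · rw [pvWalk, if_neg hcond]
      simp only [List.reverse_nil, List.foldl_nil]
      exact ⟨pvLcpAt_stop s a c i j hc hcond, hc⟩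

theorem pvLcpAt_spec (s a : List String) (c : PySem.Dict (Nat × Nat) Nat) (i j : Nat)
    (hc : pvCacheOK s a c) :
    (pvLcpAt s a c i j).1 = pvLcp (s.drop i) (a.drop j) ∧
      pvCacheOK s a (pvLcpAt s a c i j).2 :=
  pvWalkFold_spec s a c (s.length + 1) i j (by omega) hc

-- inner loops in lockstep: A's list accumulator is always the best-length prefix of s[i:]
theorem pvInner_eq (s a : List String) (fuel : Nat) :
    ∀ (c : PySem.Dict (Nat × Nat) Nat) (i j best : Nat), pvCacheOK s a c → i < s.length →
      best ≤ s.length - i →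
      pvInnerA s a fuel i j ((s.drop i).take best) =
          (s.drop i).take ((pvInnerB s a fuel c i j best).1) ∧
        (pvInnerB s a fuel c i j best).1 ≤ s.length - i ∧
        pvCacheOK s a (pvInnerB s a fuel c i j best).2 := by
  induction fuel with
  | zero =>
    intro c i j best hc hi hb
    exact ⟨rfl, hb, hc⟩
  | succ fuel ih =>
    intro c i j best hc hi hb
    rw [pvInnerA, pvInnerB]
    by_cases hj : j < a.length
    · rw [if_pos hj, if_pos hj]
      by_cases heq : s.getD i "" = a.getD j ""
      · rw [if_pos heq, if_neg (by simpa using heq)]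
        have hL : (pvLcpAt s a c i j).1 = pvLcp (s.drop i) (a.drop j) := (pvLcpAt_spec s a c i j hc).1
        have hCO : pvCacheOK s a (pvLcpAt s a c i j).2 := (pvLcpAt_spec s a c i j hc).2
        have hmle : pvLcp (s.drop i) (a.drop j) ≤ s.length - i := by
          have := pvLcp_le_length (s.drop i) (a.drop j)
          simp only [List.length_drop] at this; omega
        have hlen : ((s.drop i).take best).length = best := by
          simp; omega
        simp only [pvExtendA_eq s a s.length i j (by omega), hlen, Nat.add_sub_cancel_left, hL]
        by_cases hlt : best < pvLcp (s.drop i) (a.drop j)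
        · simp only [if_pos hlt]
          exact ih (pvLcpAt s a c i j).2 i (j + pvLcp (s.drop i) (a.drop j))
            (pvLcp (s.drop i) (a.drop j)) hCO hi hmle
        · simp only [if_neg hlt]
          exact ih (pvLcpAt s a c i j).2 i (j + pvLcp (s.drop i) (a.drop j)) best hCO hi hb
      · rw [if_neg heq, if_pos (by simpa using heq)]
        exact ih c i (j + 1) best hc hi hb
    · rw [if_neg hj, if_neg hj]
      exact ⟨rfl, hb, hc⟩

-- outer loops in lockstep
theorem pvOuter_eq (s a : List String) (fuel : Nat) :
    ∀ (c : PySem.Dict (Nat × Nat) Nat) (i : Nat) (F : List (List String)), pvCacheOK s a c →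
      pvOuterA s a fuel i F = pvOuterB s a fuel c i F := by
  induction fuel with
  | zero => intro c i F _; rfl
  | succ fuel ih =>
    intro c i F hc
    rw [pvOuterA, pvOuterB]
    by_cases hi : i < s.length
    · rw [if_pos hi, if_pos hi]
      obtain ⟨hkey, hle, hok⟩ := pvInner_eq s a (a.length + 1) c i 0 0 hc hi (by omega)
      rw [show (s.drop i).take 0 = ([] : List String) from rfl] at hkey
      have hlen : ((s.drop i).take ((pvInnerB s a (a.length + 1) c i 0 0).1)).length
          = (pvInnerB s a (a.length + 1) c i 0 0).1 := by
        simp; omega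
      simp only [hkey, hlen]
      exact ih (pvInnerB s a (a.length + 1) c i 0 0).2 _ _ hok
    · rw [if_neg hi, if_neg hi]

-- ===== VERDICT (by name: the statement is the Claim_ definition above) =====
theorem extract_fragments_spec : Claim_equal_extract_fragments := by
  intro a s _
  unfold Spec_extract_fragments extract_fragments extract_fragments_alt
  exact pvOuter_eq s a (s.length + 1) PySem.Dict.empty 0 [] (pvCacheOK_empty s a)
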